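-- pv_equiv track=rewrite | github.com/ZrjaK/algorithm | OJ/leetcode/2395.和相等的子数组.py | findSubarrays
-- ===== SOURCE A (Python) =====
-- from typing import List
--
-- def findSubarrays(nums: List[int]) -> bool:
--     n = len(nums)
--     v = set()
--     for i in range(n-1):
--         if nums[i] + nums[i+1] in v:
--             return True
--         v.add(nums[i] + nums[i+1])
--     return False
-- ===== SOURCE B (Python) =====
-- def findSubarrays(nums):
--     sums = sorted(nums[i] + nums[i + 1] for i in range(len(nums) - 1))
--     return any(a == b for a, b in zip(sums, sums[1:]))
-- ===== Notes on version B (the rewrite author's own statement) =====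
-- stated objective: alternative
-- what changed: Replaces A's hash-set membership scan with early exit by a sort-based duplicate test: build all adjacent-pair sums, sort them, and report true iff some two neighbours in the sorted list are equal (no set at all).
import Mathlib
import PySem

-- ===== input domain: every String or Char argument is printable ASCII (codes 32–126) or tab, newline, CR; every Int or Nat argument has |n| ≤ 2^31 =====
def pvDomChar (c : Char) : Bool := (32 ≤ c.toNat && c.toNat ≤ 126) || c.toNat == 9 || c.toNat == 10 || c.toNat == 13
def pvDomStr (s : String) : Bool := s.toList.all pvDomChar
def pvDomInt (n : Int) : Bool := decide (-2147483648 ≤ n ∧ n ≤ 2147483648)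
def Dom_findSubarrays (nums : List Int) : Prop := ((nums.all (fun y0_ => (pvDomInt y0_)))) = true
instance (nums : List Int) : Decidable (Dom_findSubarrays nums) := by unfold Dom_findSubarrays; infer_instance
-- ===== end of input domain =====

-- B replaces A's incremental seen-set loop (early exit) by sorting the adjacent-pair
-- sums and scanning the sorted list for two equal neighbours — no set at all
-- (objective: alternative algorithm; O(n log n) instead of O(n) expected).

-- ===== PORT A =====
-- the loop 'for i in range(n-1): …' with its early return; indices from the range are
-- always in bounds, so nums[i] is ported with the total pyGetD (exact here)
def pvLoopA (nums : List Int) : List Int → PySem.Set Int → Bool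
  | [], _ => false
  | i :: rest, v =>
    if PySem.Set.contains v (PySem.List.pyGetD nums i 0 + PySem.List.pyGetD nums (i + 1) 0) then
      true
    else
      pvLoopA nums rest
        (PySem.Set.add v (PySem.List.pyGetD nums i 0 + PySem.List.pyGetD nums (i + 1) 0))

def findSubarrays (nums : List Int) : Bool :=
  pvLoopA nums (PySem.List.pyRange 0 ((nums.length : Int) - 1) 1) PySem.Set.empty

-- ===== PORT B =====
-- 'any(a == b for a, b in zip(sums, sums[1:]))': scan neighbouring pairs of the list
def pvAdjDup : List Int → Bool
  | a :: b :: t => a == b || pvAdjDup (b :: t)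
  | _ => false

def findSubarrays_alt (nums : List Int) : Bool :=
  let sums := (PySem.List.pyRange 0 ((nums.length : Int) - 1) 1).map
    (fun i => PySem.List.pyGetD nums i 0 + PySem.List.pyGetD nums (i + 1) 0)
  pvAdjDup (PySem.List.sorted sums (fun x => x) false)

-- ===== PRECONDITION & SPEC =====
def Spec_findSubarrays (nums : List Int) (out : Bool) : Prop := out = findSubarrays_alt nums
instance (nums : List Int) (out : Bool) : Decidable (Spec_findSubarrays nums out) := by unfold Spec_findSubarrays; infer_instance

-- ===== CLAIM (what is proved, stated in full; the proofs are below) =====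
def Claim_equal_findSubarrays : Prop := ∀ (nums : List Int), Dom_findSubarrays nums → Spec_findSubarrays nums (findSubarrays nums)

-- ===== LEMMAS AND PROOFS =====

-- A's loop viewed over the list of pair sums
def pvScan : List Int → PySem.Set Int → Bool
  | [], _ => false
  | s :: rest, v =>
    if PySem.Set.contains v s then true else pvScan rest (PySem.Set.add v s)

theorem pvLoopA_eq_pvScan (nums : List Int) (l : List Int) (v : PySem.Set Int) :
    pvLoopA nums l v =
      pvScan (l.map (fun i => PySem.List.pyGetD nums i 0 + PySem.List.pyGetD nums (i + 1) 0)) v := by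
  induction l generalizing v with
  | nil => rfl
  | cons i rest ih => simp [pvLoopA, pvScan, ih]

theorem pvScan_iff (l : List Int) (v : PySem.Set Int) :
    pvScan l v = true ↔ ¬ l.Nodup ∨ ∃ x ∈ l, x ∈ v := by
  induction l generalizing v with
  | nil => simp [pvScan]
  | cons x rest ih =>
    by_cases hx : x ∈ v
    · have hct : PySem.Set.contains v x = true := (PySem.Set.contains_iff v x).mpr hx
      simp only [pvScan, hct, if_true]
      simp only [true_iff]
      exact Or.inr ⟨x, List.mem_cons_self, hx⟩
    · have hc : PySem.Set.contains v x = false := by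
        rw [Bool.eq_false_iff]
        intro h
        exact hx ((PySem.Set.contains_iff v x).mp h)
      simp only [pvScan, hc, if_neg Bool.false_ne_true, ih, PySem.Set.mem_add,
        List.nodup_cons, List.mem_cons]
      constructor
      · rintro (h | ⟨y, hy, hyv | hyx⟩)
        · exact Or.inl (fun ⟨_, hn⟩ => h hn)
        · exact Or.inr ⟨y, Or.inr hy, hyv⟩
        · subst hyx; exact Or.inl (fun ⟨hxr, _⟩ => hxr hy)
      · rintro (h | ⟨y, hy | hy, hyv⟩)
        · by_cases hxr : x ∈ rest
          · exact Or.inr ⟨x, hxr, Or.inr rfl⟩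
          · exact Or.inl (fun hn => h ⟨hxr, hn⟩)
        · subst hy; exact absurd hyv hx
        · exact Or.inr ⟨y, hy, Or.inl hyv⟩

-- on a ≤-sorted list, an adjacent equal pair exists iff the list has a duplicate
theorem pvAdjDup_iff (l : List Int) (hp : l.Pairwise (· ≤ ·)) :
    pvAdjDup l = true ↔ ¬ l.Nodup := by
  induction l with
  | nil => simp [pvAdjDup]
  | cons a t ih =>
    cases t with
    | nil => simp [pvAdjDup]
    | cons b t2 =>
      have hab : a ≤ b := (List.pairwise_cons.mp hp).1 b List.mem_cons_self
      have hp2 : (b :: t2).Pairwise (· ≤ ·) := (List.pairwise_cons.mp hp).2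
      by_cases heq : a = b
      · subst heq
        simp [pvAdjDup, List.nodup_cons]
      · have hne : (a == b) = false := by simp [heq]
        have hnotmem : a ∉ b :: t2 := by
          intro hmem
          rcases List.mem_cons.mp hmem with h | h
          · exact heq h
          · have hba : b ≤ a := (List.pairwise_cons.mp hp2).1 a h
            exact heq (le_antisymm hab hba)
        simp only [pvAdjDup, hne, Bool.false_or, ih hp2, List.nodup_cons]
        constructor
        · rintro h ⟨-, hnd⟩; exact h hnd
        · intro h hnd; exact h ⟨hnotmem, hnd⟩

theorem findSubarrays_eq (nums : List Int) : findSubarrays nums = findSubarrays_alt nums := by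
  rw [Bool.eq_iff_iff]
  unfold findSubarrays findSubarrays_alt
  rw [pvLoopA_eq_pvScan, pvScan_iff]
  set sums := (PySem.List.pyRange 0 ((nums.length : Int) - 1) 1).map
    (fun i => PySem.List.pyGetD nums i 0 + PySem.List.pyGetD nums (i + 1) 0) with hs
  have hperm : (PySem.List.sorted sums (fun x => x) false).Perm sums :=
    PySem.List.sorted_perm sums (fun x => x) false
  rw [pvAdjDup_iff _ (PySem.List.sorted_pairwise (xs := sums) (key := fun x => x)),
    hperm.nodup_iff]
  simp

-- ===== VERDICT (by name: the statement is the Claim_ definition above) =====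
theorem findSubarrays_spec : Claim_equal_findSubarrays := by
  intro nums _
  exact (findSubarrays_eq nums)
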